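-- pv_equiv track=rewrite | github.com/awslabs/quantum-computing-exploration-for-drug-discovery-on-aws | source/src/notebook/healthcare-and-life-sciences/c-1-protein-folding-quantum-random-walk/utility/minifold.py | calculate_left_right
-- ===== SOURCE A (Python) =====
-- def calculate_left_right(window_size, right, protein_sequence_length):
--
--     left = right - 1
--
--     for _ in range(1, window_size):
--
--         if left > 1:
--             left -= 1
--
--         if right < protein_sequence_length-1:
--             right += 1
--
--     return [left, right]
-- ===== SOURCE B (Python) =====
-- def calculate_left_right(window_size, right, protein_sequence_length):
--     steps = max(window_size - 1, 0)
--     left = right - 1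
--     if left > 1:
--         left = max(left - steps, 1)
--     if right < protein_sequence_length - 1:
--         right = min(right + steps, protein_sequence_length - 1)
--     return [left, right]
-- ===== Notes on version B (the rewrite author's own statement) =====
-- stated objective: faster
-- what changed: Replaced the O(window_size) clamping loop with a closed-form max/min computation of the final left and right bounds.
import Mathlib
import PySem

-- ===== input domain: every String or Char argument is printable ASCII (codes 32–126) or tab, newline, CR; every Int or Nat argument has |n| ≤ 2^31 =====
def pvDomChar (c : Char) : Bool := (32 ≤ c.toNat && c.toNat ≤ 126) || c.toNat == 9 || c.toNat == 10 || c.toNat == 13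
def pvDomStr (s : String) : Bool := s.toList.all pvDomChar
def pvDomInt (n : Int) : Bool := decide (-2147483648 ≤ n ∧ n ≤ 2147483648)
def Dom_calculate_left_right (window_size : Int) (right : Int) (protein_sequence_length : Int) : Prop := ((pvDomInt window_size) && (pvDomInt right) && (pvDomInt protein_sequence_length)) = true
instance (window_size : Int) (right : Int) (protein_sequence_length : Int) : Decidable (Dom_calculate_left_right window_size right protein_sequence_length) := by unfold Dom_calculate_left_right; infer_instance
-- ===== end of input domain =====

-- B replaces A's O(window_size) clamping loop with a closed-form max/min computation (faster, asymptotic).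


-- ===== PORT A =====
def calculate_left_right (window_size : Int) (right : Int) (protein_sequence_length : Int) : List Int :=
  let s := (PySem.List.pyRange 1 window_size 1).foldl
    (fun (st : Int × Int) _ =>
      (if st.1 > 1 then st.1 - 1 else st.1,
       if st.2 < protein_sequence_length - 1 then st.2 + 1 else st.2))
    (right - 1, right)
  [s.1, s.2]

-- ===== PORT B =====
def calculate_left_right_alt (window_size : Int) (right : Int) (protein_sequence_length : Int) : List Int :=
  let steps := max (window_size - 1) 0
  let left0 := right - 1
  let left := if left0 > 1 then max (left0 - steps) 1 else left0
  let right' := if right < protein_sequence_length - 1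
                then min (right + steps) (protein_sequence_length - 1) else right
  [left, right']

-- ===== PRECONDITION & SPEC =====
def Spec_calculate_left_right (window_size : Int) (right : Int) (protein_sequence_length : Int) (out : List Int) : Prop := out = calculate_left_right_alt window_size right protein_sequence_length
instance (window_size : Int) (right : Int) (protein_sequence_length : Int) (out : List Int) : Decidable (Spec_calculate_left_right window_size right protein_sequence_length out) := by unfold Spec_calculate_left_right; infer_instance

-- ===== CLAIM (what is proved, stated in full; the proofs are below) =====
def Claim_equal_calculate_left_right : Prop := ∀ (window_size : Int) (right : Int) (protein_sequence_length : Int), Dom_calculate_left_right window_size right protein_sequence_length → Spec_calculate_left_right window_size right protein_sequence_length (calculate_left_right window_size right protein_sequence_length)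

-- ===== LEMMAS AND PROOFS =====
theorem clr_fold_closed (L : Int) (xs : List Int) : ∀ (l r : Int),
    xs.foldl (fun (st : Int × Int) _ =>
      (if st.1 > 1 then st.1 - 1 else st.1,
       if st.2 < L - 1 then st.2 + 1 else st.2)) (l, r)
    = ((if l > 1 then max (l - (xs.length : Int)) 1 else l),
       (if r < L - 1 then min (r + (xs.length : Int)) (L - 1) else r)) := by
  induction xs with
  | nil => intro l r; simp; omega
  | cons x xs ih =>
    intro l r
    simp only [List.foldl_cons, ih, List.length_cons, Prod.mk.injEq]
    constructor <;> (split_ifs <;> push_cast <;> omega)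

-- ===== VERDICT (by name: the statement is the Claim_ definition above) =====
theorem calculate_left_right_spec : Claim_equal_calculate_left_right := by
  intro ws r L _
  show _ = _
  unfold calculate_left_right calculate_left_right_alt
  simp only [clr_fold_closed, PySem.List.length_pyRange_one]
  have h : ((ws - 1).toNat : Int) = max (ws - 1) 0 := by omega
  rw [h]
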